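-- pv_equiv track=rewrite | github.com/ryanmccardle/nanoclaw | scripts/omnifocus/omnifocus_read.py | build_task_children
-- ===== SOURCE A (Python) =====
-- from typing import Dict, List, Optional, Tuple
--
-- def build_task_children(
--     tasks: List[Dict[str, object]],
-- ) -> Dict[str, List[Dict[str, object]]]:
--     children: Dict[str, List[Dict[str, object]]] = {}
--     for task in tasks:
--         parent_id = task.get("parent_task_id") or ""
--         if parent_id:
--             children.setdefault(parent_id, []).append(task)
--     return children
-- ===== SOURCE B (Python) =====
-- def build_task_children(tasks):
--     keys = []
--     for task in tasks:
--         p = task.get("parent_task_id") or ""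
--         if p and p not in keys:
--             keys.append(p)
--     return {k: [t for t in tasks if (t.get("parent_task_id") or "") == k] for k in keys}
-- ===== Notes on version B (the rewrite author's own statement) =====
-- stated objective: alternative
-- what changed: Replaces the streaming setdefault-accumulation dict with a two-pass scheme: first collect the distinct non-empty parent ids in first-appearance order, then build each group by filtering the whole task list per key.
import Mathlib
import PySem

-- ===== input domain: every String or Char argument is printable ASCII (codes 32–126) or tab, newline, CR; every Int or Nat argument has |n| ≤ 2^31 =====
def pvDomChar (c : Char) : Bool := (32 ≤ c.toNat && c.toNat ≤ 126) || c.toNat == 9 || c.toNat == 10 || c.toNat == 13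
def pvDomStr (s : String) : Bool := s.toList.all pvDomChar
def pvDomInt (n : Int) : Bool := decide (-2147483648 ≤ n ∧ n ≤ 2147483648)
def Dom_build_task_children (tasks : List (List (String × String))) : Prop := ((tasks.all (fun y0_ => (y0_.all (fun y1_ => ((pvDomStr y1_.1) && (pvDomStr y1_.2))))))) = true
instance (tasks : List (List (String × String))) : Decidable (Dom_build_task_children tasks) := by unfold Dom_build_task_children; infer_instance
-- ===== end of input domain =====

-- B replaces A's streaming setdefault-accumulation with a two-pass scheme (collect distinct
-- non-empty parent ids in first-appearance order, then filter the task list per key); objective: alternative.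


-- ===== PORT A =====
-- for task in tasks: parent_id = task.get("parent_task_id") or ""; if parent_id: children.setdefault(parent_id, []).append(task)
def build_task_children (tasks : List (List (String × String))) : List (String × List (List (String × String))) :=
  (tasks.foldl
    (fun children task =>
      let parent_id := (PySem.Dict.mk task).getD "parent_task_id" ""
      if parent_id ≠ "" then children.modify parent_id [] (· ++ [task]) else children)
    PySem.Dict.empty).items

-- ===== PORT B =====
-- first pass: distinct non-empty parent ids in first-appearance order; then one filter per key
def build_task_children_alt (tasks : List (List (String × String))) : List (String × List (List (String × String))) :=
  let keys := tasks.foldl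
    (fun ks task =>
      let p := (PySem.Dict.mk task).getD "parent_task_id" ""
      if p ≠ "" && !ks.contains p then ks ++ [p] else ks)
    []
  keys.map (fun k => (k, tasks.filter (fun t => (PySem.Dict.mk t).getD "parent_task_id" "" == k)))

-- ===== PRECONDITION & SPEC =====
def Spec_build_task_children (tasks : List (List (String × String))) (out : List (String × List (List (String × String)))) : Prop := out = build_task_children_alt tasks
instance (tasks : List (List (String × String))) (out : List (String × List (List (String × String)))) : Decidable (Spec_build_task_children tasks out) := by unfold Spec_build_task_children; infer_instance

-- ===== CLAIM (what is proved, stated in full; the proofs are below) =====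
def Claim_equal_build_task_children : Prop := ∀ (tasks : List (List (String × String))), Dom_build_task_children tasks → Spec_build_task_children tasks (build_task_children tasks)

-- ===== LEMMAS AND PROOFS =====

-- the parent id of one task record
def pvKey (t : List (String × String)) : String := (PySem.Dict.mk t).getD "parent_task_id" ""

-- two foldls with pointwise-equal step functions agree
theorem pvFoldlExt {α δ : Type} (f g : δ → α → δ) (h : ∀ d x, f d x = g d x)
    (l : List α) (d : δ) : l.foldl f d = l.foldl g d := by
  induction l generalizing d with
  | nil => rfl
  | cons x xs ih => simp only [List.foldl_cons, h, ih]

-- a guarded foldl is the foldl over the filtered list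
theorem pvFoldlFilter {α δ : Type} (p : α → Prop) [DecidablePred p] (f : δ → α → δ)
    (l : List α) (d : δ) :
    l.foldl (fun d x => if p x then f d x else d) d = (l.filter (fun x => p x)).foldl f d := by
  induction l generalizing d with
  | nil => rfl
  | cons x xs ih =>
    by_cases h : p x <;> simp [h, ih]

-- A's loop, restricted to the tasks with a non-empty parent id
theorem pvA_eq (tasks : List (List (String × String))) :
    build_task_children tasks =
      ((tasks.filter (fun t => pvKey t ≠ "")).foldl
        (fun d t => d.modify (pvKey t) [] (· ++ [t])) PySem.Dict.empty).items := by
  unfold build_task_children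
  refine congrArg PySem.Dict.items ?_
  refine (pvFoldlExt _ (fun d t => if pvKey t ≠ "" then d.modify (pvKey t) [] (· ++ [t]) else d)
      (fun d t => rfl) tasks PySem.Dict.empty).trans ?_
  exact pvFoldlFilter (fun t => pvKey t ≠ "")
    (fun (d : PySem.Dict String (List (List (String × String)))) t =>
      d.modify (pvKey t) [] (· ++ [t])) tasks _

-- B's first pass, restricted likewise: it is the set of the parent ids
theorem pvB_keys_eq (tasks : List (List (String × String))) :
    (tasks.foldl
      (fun ks task =>
        let p := (PySem.Dict.mk task).getD "parent_task_id" ""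
        if p ≠ "" && !ks.contains p then ks ++ [p] else ks) []) =
      PySem.Set.ofList ((tasks.filter (fun t => pvKey t ≠ "")).map pvKey) := by
  have hstep : ∀ (ks : List String) (task : List (String × String)),
      (let p := (PySem.Dict.mk task).getD "parent_task_id" ""
       if p ≠ "" && !ks.contains p then ks ++ [p] else ks) =
      (if pvKey task ≠ "" then PySem.Set.add ks (pvKey task) else ks) := by
    intro ks task
    simp only [pvKey, PySem.Set.add_eq_ite]
    by_cases h1 : (PySem.Dict.mk task).getD "parent_task_id" "" = "" <;>
      by_cases h2 : (PySem.Dict.mk task).getD "parent_task_id" "" ∈ ks <;>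
      simp [h1, h2]
  refine (pvFoldlExt _ _ hstep tasks []).trans ?_
  rw [pvFoldlFilter (fun t => pvKey t ≠ "") (fun ks t => PySem.Set.add ks (pvKey t)),
    ← PySem.Set.update_map_eq_foldl_add, PySem.Set.update_nil_left]

theorem build_task_children_spec : Claim_equal_build_task_children := by
  intro tasks _
  unfold Spec_build_task_children build_task_children_alt
  set ts := tasks.filter (fun t => pvKey t ≠ "") with hts
  -- A's dict, as items over its (nodup) key list
  have hA : build_task_children tasks =
      (PySem.Set.ofList (ts.map pvKey)).map (fun k => (k, ts.filter (fun t => pvKey t == k))) := by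
    rw [pvA_eq]
    have hnd : ((ts.foldl (fun d t => d.modify (pvKey t) [] (· ++ [t]))
        PySem.Dict.empty)).keys.Nodup :=
      PySem.Dict.nodup_keys_foldl_modify_key ts pvKey [] (fun _ t => (· ++ [t])) _
        PySem.Dict.nodup_keys_empty
    rw [PySem.Dict.items_eq_map_keys _ hnd ([] : List (List (String × String)))]
    have hkeys : ((ts.foldl (fun d t => d.modify (pvKey t) [] (· ++ [t]))
        PySem.Dict.empty)).keys = PySem.Set.ofList (ts.map pvKey) := by
      rw [PySem.Dict.keys_foldl_modify_key]
      simp [PySem.Dict.keys_empty, PySem.Set.update_nil_left]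
    rw [hkeys]
    apply List.map_congr_left
    intro k _
    have hfold : ts.foldl (fun d t => d.modify (pvKey t) [] (· ++ [t])) PySem.Dict.empty =
        (ts.map (fun t => (pvKey t, t))).foldl (fun d p => d.modify p.1 [] (· ++ [p.2]))
          PySem.Dict.empty := by
      rw [List.foldl_map]
    rw [hfold, PySem.Dict.getD_foldl_modify_append]
    simp [PySem.Dict.getD_empty, List.filter_map, Function.comp_def]
  rw [hA, pvB_keys_eq]
  apply List.map_congr_left
  intro k hk
  have hk' : k ∈ ts.map pvKey := (PySem.Set.mem_ofList _ _).mp hk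
  obtain ⟨t0, ht0, hkt0⟩ := List.mem_map.mp hk'
  have hkne : k ≠ "" := by
    have := List.of_mem_filter ht0
    simpa [hkt0] using this
  -- filtering the whole list by key k equals filtering the pre-filtered list
  have : ts.filter (fun t => pvKey t == k) = tasks.filter (fun t => pvKey t == k) := by
    rw [hts, List.filter_filter]
    apply List.filter_congr
    intro t _
    by_cases h : pvKey t = k
    · simp [h, hkne]
    · simp [h]
  rw [this]
  rfl
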